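-- pv_equiv track=rewrite | github.com/OtavioFFarina/JurisSearch | python-service/parsers/datajud.py | _format_processo
-- ===== SOURCE A (Python) =====
-- def _format_processo(numero: str) -> str:
--     """Format process number to standard NNNNNNN-NN.NNNN.N.NN.NNNN pattern."""
--     digits = "".join(c for c in numero if c.isdigit())
--
--     if len(digits) == 20:
--         return (
--             f"{digits[:7]}-{digits[7:9]}.{digits[9:13]}"
--             f".{digits[13]}.{digits[14:16]}.{digits[16:]}"
--         )
--
--     return numero  # Return as-is if format is unexpected
-- ===== SOURCE B (Python) =====
-- def _format_processo(numero: str) -> str: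
--     """Format process number to standard NNNNNNN-NN.NNNN.N.NN.NNNN pattern."""
--     digits = [c for c in numero if c.isdigit()]
--     if len(digits) != 20:
--         return numero  # Return as-is if format is unexpected
--     out = []
--     idx = 0
--     for m in "#######-##.####.#.##.####":
--         if m == "#":
--             out.append(digits[idx])
--             idx += 1
--         else:
--             out.append(m)
--     return "".join(out)
-- ===== Notes on version B (the rewrite author's own statement) =====
-- stated objective: alternative
-- what changed: Replaces the flat slice-and-f-string concatenation with a single pass over a format-mask template '#######-##.####.#.##.####' that consumes the filtered digits positionally.
import Mathlib
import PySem

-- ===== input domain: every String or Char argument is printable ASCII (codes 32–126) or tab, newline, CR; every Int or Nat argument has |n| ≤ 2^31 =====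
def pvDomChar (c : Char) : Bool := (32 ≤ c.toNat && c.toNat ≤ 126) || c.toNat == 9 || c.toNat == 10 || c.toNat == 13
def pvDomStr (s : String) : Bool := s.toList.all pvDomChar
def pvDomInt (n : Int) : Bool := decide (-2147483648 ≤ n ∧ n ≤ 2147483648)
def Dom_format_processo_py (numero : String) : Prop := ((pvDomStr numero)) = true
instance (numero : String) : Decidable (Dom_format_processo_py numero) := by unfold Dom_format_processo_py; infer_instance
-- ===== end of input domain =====

-- B rebuilds the output by one pass over a format-mask template instead of A's slice concatenation; objective: alternative decomposition.

-- ===== PORT A =====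
def format_processo_py (numero : String) : String :=
  let digits : List Char := numero.toList.filter PySem.Chars.isdigit
  if digits.length == 20 then
    String.mk (PySem.List.slice digits none (some 7) ++ ['-'] ++
      PySem.List.slice digits (some 7) (some 9) ++ ['.'] ++
      PySem.List.slice digits (some 9) (some 13) ++ ['.'] ++
      [PySem.List.pyGetD digits 13 ' '] ++ ['.'] ++   -- digits[13]: in range since length = 20
      PySem.List.slice digits (some 14) (some 16) ++ ['.'] ++
      PySem.List.slice digits (some 16) none)
  else numero

-- ===== PORT B =====
-- fill mask ds: '#' consumes the next digit, any other mask char is emitted literally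
def pvFill : List Char → List Char → List Char
  | [], _ => []
  | m :: ms, ds =>
    if m = '#' then
      match ds with
      | d :: ds' => d :: pvFill ms ds'
      | [] => []      -- unreachable under the length-20 guard
    else m :: pvFill ms ds

def format_processo_py_alt (numero : String) : String :=
  let digits : List Char := numero.toList.filter PySem.Chars.isdigit
  if digits.length == 20 then
    String.mk (pvFill "#######-##.####.#.##.####".toList digits)
  else numero

-- ===== PRECONDITION & SPEC =====
def Spec_format_processo_py (numero : String) (out : String) : Prop := out = format_processo_py_alt numero
instance (numero : String) (out : String) : Decidable (Spec_format_processo_py numero out) := by unfold Spec_format_processo_py; infer_instance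

-- ===== CLAIM (what is proved, stated in full; the proofs are below) =====
def Claim_equal_format_processo_py : Prop := ∀ (numero : String), Dom_format_processo_py numero → Spec_format_processo_py numero (format_processo_py numero)

-- ===== LEMMAS AND PROOFS =====
lemma pvKey (c0 c1 c2 c3 c4 c5 c6 c7 c8 c9 c10 c11 c12 c13 c14 c15 c16 c17 c18 c19 : Char) :
    (PySem.List.slice [c0,c1,c2,c3,c4,c5,c6,c7,c8,c9,c10,c11,c12,c13,c14,c15,c16,c17,c18,c19] none (some 7) ++ ['-'] ++
      PySem.List.slice [c0,c1,c2,c3,c4,c5,c6,c7,c8,c9,c10,c11,c12,c13,c14,c15,c16,c17,c18,c19] (some 7) (some 9) ++ ['.'] ++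
      PySem.List.slice [c0,c1,c2,c3,c4,c5,c6,c7,c8,c9,c10,c11,c12,c13,c14,c15,c16,c17,c18,c19] (some 9) (some 13) ++ ['.'] ++
      [PySem.List.pyGetD [c0,c1,c2,c3,c4,c5,c6,c7,c8,c9,c10,c11,c12,c13,c14,c15,c16,c17,c18,c19] 13 ' '] ++ ['.'] ++
      PySem.List.slice [c0,c1,c2,c3,c4,c5,c6,c7,c8,c9,c10,c11,c12,c13,c14,c15,c16,c17,c18,c19] (some 14) (some 16) ++ ['.'] ++
      PySem.List.slice [c0,c1,c2,c3,c4,c5,c6,c7,c8,c9,c10,c11,c12,c13,c14,c15,c16,c17,c18,c19] (some 16) none)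
    = pvFill "#######-##.####.#.##.####".toList [c0,c1,c2,c3,c4,c5,c6,c7,c8,c9,c10,c11,c12,c13,c14,c15,c16,c17,c18,c19] := by
  rfl

-- ===== VERDICT (by name: the statement is the Claim_ definition above) =====
theorem format_processo_py_spec : Claim_equal_format_processo_py := by
  intro numero _
  unfold Spec_format_processo_py format_processo_py format_processo_py_alt
  set ds := numero.toList.filter PySem.Chars.isdigit with hds
  by_cases h : ds.length = 20
  · simp only [h]
    match ds, h with
    | [c0,c1,c2,c3,c4,c5,c6,c7,c8,c9,c10,c11,c12,c13,c14,c15,c16,c17,c18,c19], _ =>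
      simp only [beq_self_eq_true, if_true]
      exact congrArg String.mk (pvKey c0 c1 c2 c3 c4 c5 c6 c7 c8 c9 c10 c11 c12 c13 c14 c15 c16 c17 c18 c19)
  · simp [h]
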